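-- pv_equiv track=rewrite | github.com/cyberkrunk69/Scout | src/scout/utils/summarize.py | compress_git_diff
-- ===== SOURCE A (Python) =====
-- def compress_git_diff(diff_text: str) -> str:
--     """
--     Return only changed file/function names, not full diff.
--     Useful for high-level overviews.
--
--     Args:
--         diff_text: Full git diff output
--
--     Returns:
--         Compressed representation with file names and stats
--     """
--     if not diff_text:
--         return "(empty diff)"
--
--     lines = diff_text.split("\n")
--     files: list[str] = []
--     stats: dict = {"files": 0, "additions": 0, "deletions": 0}
--
--     current_file = ""
--     for line in lines:
--         # Track file changes
--         if line.startswith("diff --git"):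
--             stats["files"] += 1
--             # Extract file name from "diff --git a/path b/path"
--             parts = line.split()
--             if len(parts) >= 3:
--                 # Get the "b/" version
--                 current_file = parts[-1].replace("b/", "")
--                 files.append(current_file)
--
--         # Count additions/deletions
--         elif line.startswith("+") and not line.startswith("+++"):
--             stats["additions"] += 1
--         elif line.startswith("-") and not line.startswith("---"):
--             stats["deletions"] += 1
--
--     # Build compressed output
--     result_lines = [
--         f"{stats['files']} file(s) changed, +{stats['additions']} -{stats['deletions']}",
--         "",
--     ]
--
--     # Add file list (limited to avoid overwhelming output)
--     if files:
--         result_lines.append("Changed files:")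
--         for f in files[:20]:  # Limit to 20 files
--             result_lines.append(f"  - {f}")
--         if len(files) > 20:
--             result_lines.append(f"  ... and {len(files) - 20} more")
--
--     return "\n".join(result_lines)
-- ===== SOURCE B (Python) =====
-- def compress_git_diff(diff_text: str) -> str:
--     """Simpler decomposition: independent passes over the lines instead of one stateful loop."""
--     if not diff_text:
--         return "(empty diff)"
--
--     lines = diff_text.split("\n")
--     headers = [line for line in lines if line.startswith("diff --git")]
--     files = [line.split()[-1].replace("b/", "")
--              for line in headers if len(line.split()) >= 3]
--     additions = sum(1 for line in lines
--                     if line.startswith("+") and not line.startswith("+++"))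
--     deletions = sum(1 for line in lines
--                     if line.startswith("-") and not line.startswith("---"))
--
--     result_lines = [f"{len(headers)} file(s) changed, +{additions} -{deletions}", ""]
--     if files:
--         result_lines.append("Changed files:")
--         result_lines.extend(f"  - {f}" for f in files[:20])
--         if len(files) > 20:
--             result_lines.append(f"  ... and {len(files) - 20} more")
--     return "\n".join(result_lines)
-- ===== Notes on version B (the rewrite author's own statement) =====
-- stated objective: simpler
-- what changed: Replaces the single stateful branching loop (files/stats/current_file accumulator) with independent comprehension passes: a header filter for the file count, a filter+map for file names, and two count passes for additions/deletions; the output-building block is unchanged.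
import Mathlib
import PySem

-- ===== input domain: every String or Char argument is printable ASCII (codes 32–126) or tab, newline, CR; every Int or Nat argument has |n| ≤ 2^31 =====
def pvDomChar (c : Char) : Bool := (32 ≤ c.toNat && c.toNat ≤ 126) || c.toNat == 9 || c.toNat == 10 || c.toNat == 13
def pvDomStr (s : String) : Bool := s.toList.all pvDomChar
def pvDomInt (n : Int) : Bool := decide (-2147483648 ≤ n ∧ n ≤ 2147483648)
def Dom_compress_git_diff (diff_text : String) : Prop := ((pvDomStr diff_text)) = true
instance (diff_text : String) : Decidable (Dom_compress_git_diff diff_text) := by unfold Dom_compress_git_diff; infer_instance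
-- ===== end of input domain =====

-- B is a simpler decomposition of A (independent passes instead of one stateful loop); same cost, same values.

-- ===== PORT A =====
-- A's loop step; `current_file` is written and read only inside one iteration, so it is a
-- local here rather than loop state. `parts[-1]` is PySem.List.pyGet?; the `.getD ""` is
-- unreachable (parts has ≥ 3 elements there).
def pvStepA (st : List String × Int × Int × Int) (line : String) : List String × Int × Int × Int :=
  if PySem.Str.startswith line "diff --git" then
    let parts := PySem.Str.split₀ line
    if 3 ≤ parts.length then
      let current_file := PySem.Str.replace ((PySem.List.pyGet? parts (-1)).getD "") "b/" ""
      (st.1 ++ [current_file], st.2.1 + 1, st.2.2.1, st.2.2.2)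
    else (st.1, st.2.1 + 1, st.2.2.1, st.2.2.2)
  else if PySem.Str.startswith line "+" && !PySem.Str.startswith line "+++" then
    (st.1, st.2.1, st.2.2.1 + 1, st.2.2.2)
  else if PySem.Str.startswith line "-" && !PySem.Str.startswith line "---" then
    (st.1, st.2.1, st.2.2.1, st.2.2.2 + 1)
  else st

-- the identical output-building block of both Pythons
def pvBuild (fcount adds dels : Int) (files : List String) : String :=
  let result_lines : List String :=
    [PySem.Int.toStr fcount ++ " file(s) changed, +" ++ PySem.Int.toStr adds ++ " -" ++ PySem.Int.toStr dels, ""]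
  let result_lines :=
    if files ≠ [] then
      let result_lines := result_lines ++ ["Changed files:"]
      let result_lines := result_lines ++ (files.take 20).map (fun f => "  - " ++ f)
      if 20 < files.length then
        result_lines ++ ["  ... and " ++ PySem.Int.toStr ((files.length : Int) - 20) ++ " more"]
      else result_lines
    else result_lines
  PySem.Str.join "\n" result_lines

def compress_git_diff (diff_text : String) : String :=
  if diff_text = "" then "(empty diff)"
  else
    let lines := (PySem.Str.split? diff_text "\n").getD []  -- sep "\n" ≠ "": getD unreachable
    let st := lines.foldl pvStepA ([], 0, 0, 0)
    pvBuild st.2.1 st.2.2.1 st.2.2.2 st.1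

-- ===== PORT B =====
def compress_git_diff_alt (diff_text : String) : String :=
  if diff_text = "" then "(empty diff)"
  else
    let lines := (PySem.Str.split? diff_text "\n").getD []  -- sep "\n" ≠ "": getD unreachable
    let headers := lines.filter (fun l => PySem.Str.startswith l "diff --git")
    let files := (headers.filter (fun l => 3 ≤ (PySem.Str.split₀ l).length)).map
      (fun l => PySem.Str.replace ((PySem.List.pyGet? (PySem.Str.split₀ l) (-1)).getD "") "b/" "")
    let additions : Int := lines.countP (fun l => PySem.Str.startswith l "+" && !PySem.Str.startswith l "+++")
    let deletions : Int := lines.countP (fun l => PySem.Str.startswith l "-" && !PySem.Str.startswith l "---")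
    pvBuild (headers.length : Int) additions deletions files

-- ===== PRECONDITION & SPEC =====
def Spec_compress_git_diff (diff_text : String) (out : String) : Prop := out = compress_git_diff_alt diff_text
instance (diff_text : String) (out : String) : Decidable (Spec_compress_git_diff diff_text out) := by unfold Spec_compress_git_diff; infer_instance

-- ===== CLAIM (what is proved, stated in full; the proofs are below) =====
def Claim_equal_compress_git_diff : Prop := ∀ (diff_text : String), Dom_compress_git_diff diff_text → Spec_compress_git_diff diff_text (compress_git_diff diff_text)

-- ===== LEMMAS AND PROOFS =====

-- a "diff --git" line cannot start with "+" or "-"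
theorem hdr_not_plus (l : String) (h : PySem.Str.startswith l "diff --git" = true) :
    PySem.Str.startswith l "+" = false := by
  simp only [PySem.Str.startswith_eq, PySem.Chars.startswith_iff] at *
  obtain ⟨t, ht⟩ := h
  by_contra hb
  rw [Bool.not_eq_false, PySem.Chars.startswith_iff] at hb
  obtain ⟨u, hu⟩ := hb
  rw [← ht] at hu
  simp at hu

theorem hdr_not_minus (l : String) (h : PySem.Str.startswith l "diff --git" = true) :
    PySem.Str.startswith l "-" = false := by
  simp only [PySem.Str.startswith_eq, PySem.Chars.startswith_iff] at *
  obtain ⟨t, ht⟩ := h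
  by_contra hb
  rw [Bool.not_eq_false, PySem.Chars.startswith_iff] at hb
  obtain ⟨u, hu⟩ := hb
  rw [← ht] at hu
  simp at hu

-- a "+" line cannot start with "-" (and vice versa)
theorem plus_not_minus (l : String) (h : PySem.Str.startswith l "+" = true) :
    PySem.Str.startswith l "-" = false := by
  simp only [PySem.Str.startswith_eq, PySem.Chars.startswith_iff] at *
  obtain ⟨t, ht⟩ := h
  by_contra hb
  rw [Bool.not_eq_false, PySem.Chars.startswith_iff] at hb
  obtain ⟨u, hu⟩ := hb
  rw [← ht] at hu
  simp at hu

-- the loop of A computes exactly B's four passes (with the accumulator offsets)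
theorem loopA_eq (lines : List String) (files : List String) (fc a d : Int) :
    lines.foldl pvStepA (files, fc, a, d) =
      (files ++ ((lines.filter (fun l => PySem.Str.startswith l "diff --git")).filter
                  (fun l => 3 ≤ (PySem.Str.split₀ l).length)).map
                  (fun l => PySem.Str.replace ((PySem.List.pyGet? (PySem.Str.split₀ l) (-1)).getD "") "b/" ""),
       fc + ((lines.filter (fun l => PySem.Str.startswith l "diff --git")).length : Int),
       a + (lines.countP (fun l => PySem.Str.startswith l "+" && !PySem.Str.startswith l "+++") : Int),
       d + (lines.countP (fun l => PySem.Str.startswith l "-" && !PySem.Str.startswith l "---") : Int)) := by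
  induction lines generalizing files fc a d with
  | nil => simp
  | cons l ls ih =>
    simp only [List.foldl_cons]
    by_cases h1 : PySem.Str.startswith l "diff --git" = true
    · have hp := hdr_not_plus l h1
      have hm := hdr_not_minus l h1
      by_cases h2 : 3 ≤ (PySem.Str.split₀ l).length
      · simp only [pvStepA, h1, if_pos h2, if_true]
        rw [ih]
        simp only [List.filter_cons, List.countP_cons, h1, hp, hm, Bool.false_and]
        simp [h2, List.append_assoc]
        omega
      · simp only [pvStepA, h1, if_neg h2, if_true]
        rw [ih]
        simp only [List.filter_cons, List.countP_cons, h1, hp, hm, Bool.false_and]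
        simp [h2]
        omega
    · have h1' : PySem.Str.startswith l "diff --git" = false := by
        revert h1; cases PySem.Str.startswith l "diff --git" <;> simp
      by_cases h2 : (PySem.Str.startswith l "+" && !PySem.Str.startswith l "+++") = true
      · have hm2 : PySem.Str.startswith l "-" = false :=
          plus_not_minus l (Bool.and_eq_true_iff.mp h2).1
        simp only [pvStepA, h1', h2, Bool.false_eq_true, if_false, if_true]
        rw [ih]
        simp only [List.filter_cons, List.countP_cons, h1', h2, hm2, Bool.false_and]
        simp
        omega
      · have h2' : (PySem.Str.startswith l "+" && !PySem.Str.startswith l "+++") = false := by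
          revert h2; cases (PySem.Str.startswith l "+" && !PySem.Str.startswith l "+++") <;> simp
        by_cases h3 : (PySem.Str.startswith l "-" && !PySem.Str.startswith l "---") = true
        · simp only [pvStepA, h1', h2', h3, Bool.false_eq_true, if_false, if_true]
          rw [ih]
          simp only [List.filter_cons, List.countP_cons, h1', h2', h3, Bool.false_eq_true]
          simp
          omega
        · have h3' : (PySem.Str.startswith l "-" && !PySem.Str.startswith l "---") = false := by
            revert h3; cases (PySem.Str.startswith l "-" && !PySem.Str.startswith l "---") <;> simp
          simp only [pvStepA, h1', h2', h3', Bool.false_eq_true, if_false]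
          rw [ih]
          simp only [List.filter_cons, List.countP_cons, h1', h2', h3', Bool.false_eq_true, if_false]
          simp

-- ===== VERDICT (by name: the statement is the Claim_ definition above) =====
theorem compress_git_diff_spec : Claim_equal_compress_git_diff := by
  intro diff_text _
  show compress_git_diff diff_text = compress_git_diff_alt diff_text
  unfold compress_git_diff compress_git_diff_alt
  by_cases h : diff_text = ""
  · simp [h]
  · simp only [h, if_false]
    rw [loopA_eq]
    simp
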